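-- pv_equiv track=rewrite | github.com/aaronthangnguyen/leetcode | playground.py | single_digit
-- ===== SOURCE A (Python) =====
-- def single_digit(number: int) -> int:
--     while number > 9:
--         new_number = 0
--         while number > 9:
--             two_digits = number % 100
--             new_number = new_number * 10 + abs(two_digits // 10 - two_digits % 10)
--             number //= 10
--         number = new_number
--     return number
-- ===== SOURCE B (Python) =====
-- def _digits(n):
--     # most-significant-first digit list
--     return _digits(n // 10) + [n % 10] if n > 9 else [n]
--
--
-- def single_digit(number: int) -> int:
--     while number > 9:
--         ds = _digits(number)
--         diffs = [abs(a - b) for a, b in zip(ds, ds[1:])]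
--         number = sum(v * 10 ** i for i, v in enumerate(diffs))
--     return number
-- ===== Notes on version B (the rewrite author's own statement) =====
-- stated objective: alternative
-- what changed: A collapses digits with two nested while-loops, a two-digit modulus window and a Horner-style integer accumulator; B instead decomposes the number into an explicit most-significant-first digit list, takes pairwise absolute differences with zip, and rebuilds the number as a positional power-of-ten sum.
import Mathlib
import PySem

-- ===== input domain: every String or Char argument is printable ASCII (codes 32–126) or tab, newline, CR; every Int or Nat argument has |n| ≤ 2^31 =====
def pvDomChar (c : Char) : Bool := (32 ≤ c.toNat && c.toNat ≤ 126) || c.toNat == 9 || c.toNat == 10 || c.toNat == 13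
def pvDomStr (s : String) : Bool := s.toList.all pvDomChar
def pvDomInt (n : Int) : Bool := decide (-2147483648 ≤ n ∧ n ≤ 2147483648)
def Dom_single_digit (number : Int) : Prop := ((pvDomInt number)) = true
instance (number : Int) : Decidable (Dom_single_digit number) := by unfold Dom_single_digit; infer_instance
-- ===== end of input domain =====

-- B replaces A's nested while-loops (two-digit modulus window + Horner accumulator) by an explicit
-- MSB-first digit list, zip-pairwise absolute differences and a positional power-of-ten sum
-- (objective: alternative decomposition, same cost).

-- ===== PORT A =====
-- inner 'while number > 9' loop of A; state = (number, new_number).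
-- fuel only makes the loop total: number.toNat + 1 always exceeds the iteration count
-- (number //= 10 strictly decreases a positive number each pass).
def singleDigitInner (fuel : Nat) (number new_number : Int) : Int :=
  match fuel with
  | 0 => new_number
  | f + 1 =>
    if 9 < number then
      singleDigitInner f (PySem.Int.floordiv number 10)
        (new_number * 10 +
          |PySem.Int.floordiv (PySem.Int.mod number 100) 10 -
            PySem.Int.mod (PySem.Int.mod number 100) 10|)
    else new_number

-- outer 'while number > 9' loop of A; fuel number.toNat + 1 always suffices
-- (each round's value is nonnegative and strictly below the previous number).
def singleDigitOuter (fuel : Nat) (number : Int) : Int :=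
  match fuel with
  | 0 => number
  | f + 1 =>
    if 9 < number then singleDigitOuter f (singleDigitInner (number.toNat + 1) number 0)
    else number

def single_digit (number : Int) : Int := singleDigitOuter (number.toNat + 1) number

-- ===== PORT B =====
-- B's helper _digits: most-significant-first digit list (fuel as above, always sufficient)
def bDigits (fuel : Nat) (n : Int) : List Int :=
  match fuel with
  | 0 => [n]
  | f + 1 =>
    if 9 < n then bDigits f (PySem.Int.floordiv n 10) ++ [PySem.Int.mod n 10] else [n]

-- one pass of B's 'while' body: ds, diffs, positional power-of-ten sum
def bRound (n : Int) : Int :=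
  let ds := bDigits (n.toNat + 1) n
  let diffs := (ds.zip ds.tail).map (fun ab => |ab.1 - ab.2|)
  ((PySem.List.enumerate diffs).map (fun iv => iv.2 * 10 ^ iv.1.toNat)).sum

-- B's outer 'while number > 9' loop
def singleDigitAltOuter (fuel : Nat) (number : Int) : Int :=
  match fuel with
  | 0 => number
  | f + 1 => if 9 < number then singleDigitAltOuter f (bRound number) else number

def single_digit_alt (number : Int) : Int := singleDigitAltOuter (number.toNat + 1) number

-- ===== PRECONDITION & SPEC =====
def Spec_single_digit (number : Int) (out : Int) : Prop := out = single_digit_alt number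
instance (number : Int) (out : Int) : Decidable (Spec_single_digit number out) := by unfold Spec_single_digit; infer_instance

-- ===== CLAIM (what is proved, stated in full; the proofs are below) =====
def Claim_equal_single_digit : Prop := ∀ (number : Int), Dom_single_digit number → Spec_single_digit number (single_digit number)

-- ===== LEMMAS AND PROOFS =====

-- proof-side digit list (MSB-first), no fuel
def dl (n : Int) : List Int :=
  if 9 < n then dl (n / 10) ++ [n % 10] else [n]
termination_by n.toNat
decreasing_by omega

-- proof-side recursive form of B's positional sum of pairwise differences
def bv : List Int → Int
  | a :: b :: t => |a - b| + 10 * bv (b :: t)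
  | _ => 0

-- proof-side form of A's inner loop over an LSB-first digit list
def hornerDiff : List Int → Int → Int
  | a :: b :: t, acc => hornerDiff (b :: t) (acc * 10 + |b - a|)
  | _, acc => acc

theorem bDigits_eq (f : Nat) (n : Int) (h : n.toNat < f) : bDigits f n = dl n := by
  induction f generalizing n with
  | zero => omega
  | succ f ih =>
    rw [bDigits, dl]
    split
    · rename_i h9
      rw [PySem.Int.floordiv_eq_ediv_of_pos (by omega : (0:Int) < 10),
          PySem.Int.mod_eq_emod_of_pos (by omega : (0:Int) < 10)]
      rw [ih (n / 10) (by omega)]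
    · rfl

theorem dl_ne_nil (n : Int) : dl n ≠ [] := by
  rw [dl]
  split <;> simp

theorem dl_getLast? (n : Int) (hn : 0 ≤ n) : (dl n).getLast? = some (n % 10) := by
  rw [dl]
  split
  · exact List.getLast?_concat
  · have : n % 10 = n := by omega
    rw [this]
    rfl

theorem dl_head (n : Int) (hn : 0 ≤ n) : ∃ t, (dl n).reverse = n % 10 :: t := by
  have h := dl_getLast? n hn
  rw [← List.head?_reverse] at h
  cases hrev : (dl n).reverse with
  | nil => rw [hrev] at h; simp at h
  | cons a t =>
    rw [hrev] at h
    simp at h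
    exact ⟨t, by rw [h]⟩

theorem aInner_eq (f : Nat) (n acc : Int) (h : n.toNat < f) :
    singleDigitInner f n acc = hornerDiff ((dl n).reverse) acc := by
  induction f generalizing n acc with
  | zero => omega
  | succ f ih =>
    rw [singleDigitInner, dl]
    split
    · rename_i h9
      rw [PySem.Int.floordiv_eq_ediv_of_pos (by omega : (0:Int) < 10)]
      obtain ⟨t, ht⟩ := dl_head (n / 10) (by omega)
      rw [ih (n / 10) _ (by omega)]
      rw [List.reverse_append]
      simp only [List.reverse_cons, List.reverse_nil, List.nil_append, List.cons_append]
      rw [ht, hornerDiff]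
      congr 2
      simp only [PySem.Int.mod_eq_emod_of_pos (show (0:Int) < 100 by omega),
        PySem.Int.mod_eq_emod_of_pos (show (0:Int) < 10 by omega),
        PySem.Int.floordiv_eq_ediv_of_pos (show (0:Int) < 10 by omega)]
      have e1 : n % 100 % 10 = n % 10 := Int.emod_emod_of_dvd n (by norm_num)
      have e2 : n % 100 / 10 = n / 10 % 10 := by omega
      rw [e1, e2]
    · simp [hornerDiff]

theorem psum_cons (l : List Int) (s : Int) (hs : 0 ≤ s) :
    ((PySem.List.enumerate l (s + 1)).map (fun iv => iv.2 * 10 ^ iv.1.toNat)).sum =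
      10 * ((PySem.List.enumerate l s).map (fun iv => iv.2 * 10 ^ iv.1.toNat)).sum := by
  induction l generalizing s with
  | nil => simp [PySem.List.enumerate_nil]
  | cons y ys ih =>
    rw [PySem.List.enumerate_cons, PySem.List.enumerate_cons]
    simp only [List.map_cons, List.sum_cons]
    rw [ih (s + 1) (by omega)]
    have hpow : (s + 1).toNat = s.toNat + 1 := by omega
    rw [hpow, pow_succ]
    ring

theorem bv_eq_psum (l : List Int) :
    ((PySem.List.enumerate ((l.zip l.tail).map (fun ab => |ab.1 - ab.2|))).map
        (fun iv => iv.2 * 10 ^ iv.1.toNat)).sum = bv l := by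
  induction l with
  | nil => simp [bv]
  | cons a l ih =>
    cases l with
    | nil => simp [bv]
    | cons b t =>
      simp only [List.tail_cons, List.zip_cons_cons, List.map_cons]
      rw [bv, PySem.List.enumerate_cons]
      simp only [List.map_cons, List.sum_cons]
      rw [psum_cons _ 0 le_rfl]
      simpa using ih

theorem bv_snoc (ds : List Int) (b a : Int) (h : ds ≠ []) (hlast : ds.getLast h = b) :
    bv (ds ++ [a]) = bv ds + |b - a| * 10 ^ (ds.length - 1) := by
  induction ds with
  | nil => exact absurd rfl h
  | cons c ds' ih =>
    cases ds' with
    | nil =>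
      simp at hlast
      subst hlast
      simp [bv]
    | cons e t =>
      have hlast' : (e :: t).getLast (by simp) = b := by
        rw [← hlast]
        exact (List.getLast_cons _).symm
      have ihe := ih (by simp) hlast'
      simp only [List.cons_append] at *
      rw [bv]
      have hcons : bv (c :: e :: t) = |c - e| + 10 * bv (e :: t) := by rw [bv]
      rw [ihe, hcons]
      have hl1 : (c :: e :: t).length - 1 = t.length + 1 := by simp
      have hl2 : (e :: t).length - 1 = t.length := by simp
      rw [hl1, hl2, pow_succ]
      ring

theorem hornerDiff_eq (l : List Int) (acc : Int) (h : l ≠ []) :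
    hornerDiff l acc = acc * 10 ^ (l.length - 1) + bv l.reverse := by
  induction l generalizing acc with
  | nil => exact absurd rfl h
  | cons a l ih =>
    cases l with
    | nil => simp [hornerDiff, bv]
    | cons b t =>
      rw [hornerDiff, ih _ (by simp)]
      have hrev : (a :: b :: t).reverse = ((b :: t).reverse) ++ [a] := by simp
      have hne : (b :: t).reverse ≠ [] := by simp
      have hlast : ((b :: t).reverse).getLast hne = b := by simp
      rw [hrev, bv_snoc _ b a hne hlast]
      have hlen : ((b :: t).reverse).length - 1 = t.length := by simp
      have hlen2 : (a :: b :: t).length - 1 = t.length + 1 := by simp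
      have hlen3 : (b :: t).length - 1 = t.length := by simp
      rw [hlen, hlen2, hlen3, pow_succ]
      ring

theorem bRound_eq (n : Int) : bRound n = singleDigitInner (n.toNat + 1) n 0 := by
  rw [bRound]
  rw [bDigits_eq (n.toNat + 1) n (by omega)]
  rw [bv_eq_psum (dl n)]
  rw [aInner_eq (n.toNat + 1) n 0 (by omega)]
  rw [hornerDiff_eq _ 0 (by simpa using dl_ne_nil n)]
  simp

theorem outer_eq (f : Nat) (n : Int) : singleDigitOuter f n = singleDigitAltOuter f n := by
  induction f generalizing n with
  | zero => rfl
  | succ f ih =>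
    rw [singleDigitOuter, singleDigitAltOuter]
    split
    · rename_i h9
      rw [bRound_eq n]
      exact ih _
    · rfl

-- ===== VERDICT (by name: the statement is the Claim_ definition above) =====
theorem single_digit_spec : Claim_equal_single_digit := by
  intro number _
  exact outer_eq (number.toNat + 1) number
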